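-- pv_equiv track=rewrite | github.com/Smokierpizza17/AdventOfCode | (10) adapterArray/part2.py | splitByThreeDiffs
-- ===== SOURCE A (Python) =====
-- def splitByThreeDiffs(adapterArray):
--     '''Returns list of lists, each a chain of one diff adapters'''
--     finalArray = []
--     currentSeries = []
--     for index, adapter in enumerate(adapterArray[:-1]):
--         nextAdapter = adapterArray[index + 1]
--         nextDiff = nextAdapter - adapter
--         currentSeries.append(adapter)
--         if nextDiff == 3:
--             finalArray.append(currentSeries)
--             currentSeries = []
--     return finalArray
-- ===== SOURCE B (Python) =====
-- def splitByThreeDiffs(adapterArray):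
--     '''Returns list of lists, each a chain of one diff adapters'''
--     bounds = [g for g in range(len(adapterArray) - 1)
--               if adapterArray[g + 1] - adapterArray[g] == 3]
--     result = []
--     start = 0
--     for g in bounds:
--         result.append(adapterArray[start:g + 1])
--         start = g + 1
--     return result
-- ===== Notes on version B (the rewrite author's own statement) =====
-- stated objective: alternative
-- what changed: B first computes the list of diff-3 boundary indices, then builds each chain as a slice between consecutive boundaries, instead of A's element-by-element accumulation into a running currentSeries.
import Mathlib
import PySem

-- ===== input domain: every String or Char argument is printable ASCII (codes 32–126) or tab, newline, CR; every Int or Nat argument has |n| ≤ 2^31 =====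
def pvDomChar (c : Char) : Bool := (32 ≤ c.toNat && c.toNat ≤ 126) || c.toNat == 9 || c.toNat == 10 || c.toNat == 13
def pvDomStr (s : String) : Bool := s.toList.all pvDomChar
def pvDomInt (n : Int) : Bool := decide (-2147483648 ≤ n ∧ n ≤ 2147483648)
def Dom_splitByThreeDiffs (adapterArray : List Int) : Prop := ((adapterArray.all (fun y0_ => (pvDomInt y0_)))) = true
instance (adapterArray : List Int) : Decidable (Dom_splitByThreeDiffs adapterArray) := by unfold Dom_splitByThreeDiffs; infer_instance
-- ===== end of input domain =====

-- B computes the diff-3 boundary indices first and then cuts each chain out as a slice,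
-- instead of A's running accumulation; same cost, different decomposition (objective: alternative).

-- ===== PORT A =====
-- one iteration of A's loop body; pr = (index, adapter)
def pvStepA (adapterArray : List Int) (st : List (List Int) × List Int) (pr : Int × Int) :
    List (List Int) × List Int :=
  let nextAdapter := PySem.List.pyGetD adapterArray (pr.1 + 1) 0  -- index+1 < len always, so Python never raises here
  let nextDiff := nextAdapter - pr.2
  let currentSeries := st.2 ++ [pr.2]
  if nextDiff == 3 then (st.1 ++ [currentSeries], []) else (st.1, currentSeries)

def splitByThreeDiffs (adapterArray : List Int) : List (List Int) :=
  ((PySem.List.enumerate (PySem.List.slice adapterArray none (some (-1))) 0).foldl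
    (pvStepA adapterArray) ([], [])).1

-- ===== PORT B =====
def pvStepB (adapterArray : List Int) (st : List (List Int) × Int) (g : Int) :
    List (List Int) × Int :=
  (st.1 ++ [PySem.List.slice adapterArray (some st.2) (some (g + 1))], g + 1)

def splitByThreeDiffs_alt (adapterArray : List Int) : List (List Int) :=
  let bounds := (PySem.List.pyRange 0 ((adapterArray.length : Int) - 1) 1).filter
    (fun g => PySem.List.pyGetD adapterArray (g + 1) 0 - PySem.List.pyGetD adapterArray g 0 == 3)
  (bounds.foldl (pvStepB adapterArray) (([] : List (List Int)), (0 : Int))).1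

-- ===== PRECONDITION & SPEC =====
def Spec_splitByThreeDiffs (adapterArray : List Int) (out : List (List Int)) : Prop := out = splitByThreeDiffs_alt adapterArray
instance (adapterArray : List Int) (out : List (List Int)) : Decidable (Spec_splitByThreeDiffs adapterArray out) := by unfold Spec_splitByThreeDiffs; infer_instance

-- ===== CLAIM (what is proved, stated in full; the proofs are below) =====
def Claim_equal_splitByThreeDiffs : Prop := ∀ (adapterArray : List Int), Dom_splitByThreeDiffs adapterArray → Spec_splitByThreeDiffs adapterArray (splitByThreeDiffs adapterArray)

-- ===== LEMMAS AND PROOFS =====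

-- appending the j-th element extends a slice by one
lemma pv_slice_snoc (a : List Int) (s j : Int) (hs : 0 ≤ s) (hsj : s ≤ j)
    (hj : j < (a.length : Int)) :
    PySem.List.slice a (some s) (some j) ++ [PySem.List.pyGetD a j 0]
      = PySem.List.slice a (some s) (some (j + 1)) := by
  have h0j : 0 ≤ j := hs.trans hsj
  rw [PySem.List.slice_toNat a hs h0j, PySem.List.slice_toNat a hs (by omega),
    PySem.List.pyGetD_eq_getElem a 0 h0j hj]
  have hlen : j.toNat < a.length := by omega
  have h1 : (j + 1).toNat - s.toNat = (j.toNat - s.toNat) + 1 := by omega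
  rw [h1, List.take_add_one]
  have h2 : (a.drop s.toNat)[j.toNat - s.toNat]? = some a[j.toNat] := by
    rw [List.getElem?_drop]
    rw [List.getElem?_eq_getElem (by omega)]
    congr 1
    congr 1
    omega
  simp [h2]

lemma pv_slice_nil (a : List Int) (j : Int) (hj : 0 ≤ j) :
    PySem.List.slice a (some j) (some j) = [] := by
  rw [PySem.List.slice_toNat a hj hj]
  simp

def pvP (a : List Int) (g : Int) : Bool :=
  PySem.List.pyGetD a (g + 1) 0 - PySem.List.pyGetD a g 0 == 3

-- loop correspondence: A's state (fin, currentSeries) vs B's state (fin, start)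
lemma pv_core (a : List Int) : ∀ (k : Nat) (j s : Int) (fin : List (List Int)),
    0 ≤ s → s ≤ j → j + (k : Int) ≤ (a.length : Int) - 1 →
    (PySem.List.pyRange j (j + (k : Int)) 1).foldl
        (fun st g => pvStepA a st (g, PySem.List.pyGetD a g 0))
        (fin, PySem.List.slice a (some s) (some j))
      = (let F := ((PySem.List.pyRange j (j + (k : Int)) 1).filter (pvP a)).foldl (pvStepB a) (fin, s)
         (F.1, PySem.List.slice a (some F.2) (some (j + (k : Int))))) := by
  intro k
  induction k with
  | zero =>
    intro j s fin hs hsj hk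
    rw [PySem.List.pyRange_one_eq_nil (by omega)]
    simp
  | succ k ih =>
    intro j s fin hs hsj hk
    have hcons : PySem.List.pyRange j (j + ((k + 1 : Nat) : Int)) 1
        = j :: PySem.List.pyRange (j + 1) (j + ((k + 1 : Nat) : Int)) 1 :=
      PySem.List.pyRange_one_cons (by push_cast [Nat.cast_add]; omega)
    have hrange : j + ((k + 1 : Nat) : Int) = (j + 1) + (k : Int) := by push_cast; ring
    have hsnoc := pv_slice_snoc a s j hs hsj (by push_cast at hk ⊢; omega)
    rw [hcons]
    by_cases hp : pvP a j = true
    · simp only [List.foldl_cons, List.filter_cons, hp]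
      have hAstep : pvStepA a (fin, PySem.List.slice a (some s) (some j))
            (j, PySem.List.pyGetD a j 0)
          = (fin ++ [PySem.List.slice a (some s) (some (j + 1))], []) := by
        unfold pvStepA
        unfold pvP at hp
        simp only [hp, if_true, hsnoc]
      rw [hAstep]
      have hnil := pv_slice_nil a (j + 1) (by omega)
      rw [show ([] : List Int) = PySem.List.slice a (some (j+1)) (some (j+1)) from hnil.symm]
      rw [hrange]
      exact ih (j + 1) (j + 1) (fin ++ [PySem.List.slice a (some s) (some (j + 1))])
        (by omega) le_rfl (by rw [hrange] at hk; exact hk)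
    · simp only [List.foldl_cons, List.filter_cons, hp]
      have hAstep : pvStepA a (fin, PySem.List.slice a (some s) (some j))
            (j, PySem.List.pyGetD a j 0)
          = (fin, PySem.List.slice a (some s) (some (j + 1))) := by
        unfold pvStepA
        unfold pvP at hp
        simp only [hp, if_false, hsnoc, Bool.false_eq_true]
      rw [hAstep, hrange]
      exact ih (j + 1) s fin hs (by omega) (by rw [hrange] at hk; exact hk)

-- ===== VERDICT (by name: the statement is the Claim_ definition above) =====
theorem splitByThreeDiffs_spec : Claim_equal_splitByThreeDiffs := by
  intro a _
  unfold Spec_splitByThreeDiffs splitByThreeDiffs splitByThreeDiffs_alt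
  rcases a with _ | ⟨x, xs⟩
  · rfl
  set a := x :: xs with ha
  have hlen : 1 ≤ a.length := by simp [ha]
  rw [PySem.List.slice_to_neg_one,
    PySem.List.enumerate_eq_map_pyRange _ 0, List.foldl_map, PySem.List.len]
  have hdl : (a.dropLast.length : Int) = (a.length : Int) - 1 := by
    simp [List.length_dropLast]; omega
  have hcongr : (PySem.List.pyRange 0 (a.dropLast.length : Int) 1).foldl
      (fun st j => pvStepA a st (j, PySem.List.pyGetD a.dropLast j 0)) ([], [])
      = (PySem.List.pyRange 0 (a.dropLast.length : Int) 1).foldl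
      (fun st j => pvStepA a st (j, PySem.List.pyGetD a j 0)) ([], []) := by
    apply PySem.List.foldl_congr_mem
    intro st j hj
    rw [PySem.List.mem_pyRange_one] at hj
    have hj2 : j < (a.dropLast.length : Int) := hj.2
    congr 2
    rw [PySem.List.pyGetD_eq_getElem _ 0 hj.1 (by rw [hdl] at hj2; omega),
      PySem.List.pyGetD_eq_getElem _ 0 hj.1 (by omega)]
    exact List.getElem_dropLast (by omega)
  rw [hcongr]
  have hk : (a.dropLast.length : Int) = 0 + ((a.dropLast.length : Nat) : Int) := by omega
  have hnil : ([] : List Int) = PySem.List.slice a (some 0) (some 0) :=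
    (pv_slice_nil a 0 le_rfl).symm
  rw [hk, hnil]
  have hmain := pv_core a a.dropLast.length 0 0 [] le_rfl le_rfl (by rw [← hk, hdl])
  rw [hmain]
  have hb : ((a.length : Int) - 1) = 0 + ((a.dropLast.length : Nat) : Int) := by
    rw [← hk, hdl]
  rw [hb]
  rfl
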